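-- pv_equiv track=rewrite | github.com/abhinav5-0/GeeksForGeeks-POTD | 2026/January/Day-23-Maximum People Visible in a Line/Python solution/solution.py | maxPeople
-- ===== SOURCE A (Python) =====
-- def maxPeople(arr):
--     n = len(arr)
--     left = [0] * n
--     right = [0] * n
--     stack = []
--
--     # Left side
--     for i in range(n):
--         while stack and arr[stack[-1]] < arr[i]:
--             left[i] += 1
--             stack.pop()
--         if stack:
--             left[i] += 1
--         stack.append(i)
--
--     stack.clear()
--
--     # Right side
--     for i in range(n - 1, -1, -1):
--         while stack and arr[stack[-1]] < arr[i]: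
--             right[i] += 1
--             stack.pop()
--         if stack:
--             right[i] += 1
--         stack.append(i)
--
--     ans = 0
--     for i in range(n):
--         ans = max(ans, left[i] + right[i] + 1)
--
--     return ans
-- ===== SOURCE B (Python) =====
-- def maxPeople(arr):
--     n = len(arr)
--     best = 0
--     for i in range(n):
--         vi = arr[i]
--         c = 0
--         m = None
--         for j in range(i - 1, -1, -1):
--             v = arr[j]
--             if m is None or v >= m:
--                 c += 1
--                 m = v
--                 if v >= vi:
--                     break
--         m = None
--         for j in range(i + 1, n):
--             v = arr[j]
--             if m is None or v >= m:
--                 c += 1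
--                 m = v
--                 if v >= vi:
--                     break
--         best = max(best, c + 1)
--     return best
-- ===== Notes on version B (the rewrite author's own statement) =====
-- stated objective: alternative
-- what changed: Replaces A's two monotonic-stack passes with left/right auxiliary arrays by a direct per-index outward scan that keeps only a running maximum and stops at the first blocker of height >= arr[i].
import Mathlib
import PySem

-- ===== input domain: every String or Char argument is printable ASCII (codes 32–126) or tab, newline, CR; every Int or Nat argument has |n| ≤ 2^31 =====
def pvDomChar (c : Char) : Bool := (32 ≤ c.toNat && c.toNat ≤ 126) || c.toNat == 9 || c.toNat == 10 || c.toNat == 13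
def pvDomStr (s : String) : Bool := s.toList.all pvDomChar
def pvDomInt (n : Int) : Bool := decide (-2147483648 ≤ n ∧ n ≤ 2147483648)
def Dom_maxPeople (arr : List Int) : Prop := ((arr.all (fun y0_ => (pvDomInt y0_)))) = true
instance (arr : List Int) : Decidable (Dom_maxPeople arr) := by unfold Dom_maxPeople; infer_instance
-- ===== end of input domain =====

-- B replaces A's two monotonic-stack passes by a direct per-index outward scan (alternative algorithm, not faster).

-- ===== PORT A =====
-- the while loop: pop while stack nonempty and arr[stack[-1]] < arr[i], counting pops.
-- stack is held top-first (head = Python stack[-1]); indices on the stack are always in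
-- range, so arr[stack[-1]] is ported exactly by getD.
def popLoopA (g : Nat → Int) (xi : Int) : List Nat → Int × List Nat
  | [] => (0, [])
  | t :: rest =>
    if g t < xi then
      let r := popLoopA g xi rest
      (r.1 + 1, r.2)
    else (0, t :: rest)

-- one iteration of a pass: pop-count, add 1 if the stack is nonempty, append the count, push i
def stepA (g : Nat → Int) (st : List Int × List Nat) (i : Nat) : List Int × List Nat :=
  let r := popLoopA g (g i) st.2
  (st.1 ++ [r.1 + (if r.2.isEmpty then 0 else 1)], i :: r.2)

def maxPeople (arr : List Int) : Int :=
  let n := arr.length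
  let g := fun j => arr.getD j 0
  -- left pass over i = 0 … n-1
  let left := ((List.range n).foldl (stepA g) ([], [])).1
  -- right pass over i = n-1 … 0; its outputs come in processing order, so reverse into index order
  let right := (((List.range n).reverse.foldl (stepA g) ([], [])).1).reverse
  (List.range n).foldl (fun ans i => max ans (left.getD i 0 + right.getD i 0 + 1)) 0

-- ===== PORT B =====
-- one directional scan from Source B: r lists the values outward from i (nearest first),
-- m is the running maximum seen so far (none before the first counted element)
def scanB (vi : Int) : List Int → Option Int → Int
  | [], _ => 0
  | v :: rest, none => if vi ≤ v then 1 else 1 + scanB vi rest (some v)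
  | v :: rest, some m =>
    if m ≤ v then (if vi ≤ v then 1 else 1 + scanB vi rest (some v))
    else scanB vi rest (some m)

def maxPeople_alt (arr : List Int) : Int :=
  (List.range arr.length).foldl (fun best i =>
    let vi := arr.getD i 0
    max best (scanB vi (arr.take i).reverse none + scanB vi (arr.drop (i + 1)) none + 1)) 0

-- ===== PRECONDITION & SPEC =====
def Spec_maxPeople (arr : List Int) (out : Int) : Prop := out = maxPeople_alt arr
instance (arr : List Int) (out : Int) : Decidable (Spec_maxPeople arr out) := by unfold Spec_maxPeople; infer_instance

-- ===== CLAIM (what is proved, stated in full; the proofs are below) =====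
def Claim_equal_maxPeople : Prop := ∀ (arr : List Int), Dom_maxPeople arr → Spec_maxPeople arr (maxPeople arr)

-- ===== LEMMAS AND PROOFS =====

-- the stack (top-first, as values) after processing the values of w nearest-first
def Tstk : List Int → List Int
  | [] => []
  | a :: r => a :: (Tstk r).dropWhile (fun v => decide (v < a))

-- count elements of the stack until (inclusively) the first one ≥ xi
def cnt (xi : Int) : List Int → Int
  | [] => 0
  | b :: t => if xi ≤ b then 1 else 1 + cnt xi t

theorem dropWhile_dropWhile {α : Type} (p q : α → Bool) (l : List α)
    (h : ∀ x, p x = true → q x = true) :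
    (l.dropWhile p).dropWhile q = l.dropWhile q := by
  induction l with
  | nil => simp
  | cons a l ih =>
    by_cases hp : p a = true
    · simp [hp, h a hp, ih]
    · simp [List.dropWhile_cons, hp]

theorem scanB_some (vi : Int) (r : List Int) (m : Int) :
    scanB vi r (some m) = cnt vi ((Tstk r).dropWhile (fun v => decide (v < m))) := by
  induction r generalizing m with
  | nil => simp [scanB, Tstk, cnt]
  | cons a r ih =>
    by_cases hm : m ≤ a
    · have : ¬ (a < m) := by omega
      simp [scanB, Tstk, hm, this, cnt, ih]
    · have ha : a < m := by omega
      have : (Tstk (a :: r)).dropWhile (fun v => decide (v < m))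
          = (Tstk r).dropWhile (fun v => decide (v < m)) := by
        simp only [Tstk, List.dropWhile_cons, decide_eq_true_eq, ha, if_pos]
        exact dropWhile_dropWhile _ _ _ (by intro x hx; simp at hx ⊢; omega)
      simp [scanB, hm, this, ih]

theorem scanB_none (vi : Int) (r : List Int) :
    scanB vi r none = cnt vi (Tstk r) := by
  cases r with
  | nil => simp [scanB, Tstk, cnt]
  | cons a r => simp [scanB, Tstk, cnt, scanB_some]

-- value-level mirror of A's pass
def popLoopV (xi : Int) : List Int → Int × List Int
  | [] => (0, [])
  | v :: rest =>
    if v < xi then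
      let r := popLoopV xi rest
      (r.1 + 1, r.2)
    else (0, v :: rest)

def stepV (st : List Int × List Int) (v : Int) : List Int × List Int :=
  let r := popLoopV v st.2
  (st.1 ++ [r.1 + (if r.2.isEmpty then 0 else 1)], v :: r.2)

theorem popLoopA_map (g : Nat → Int) (xi : Int) (s : List Nat) :
    (popLoopA g xi s).1 = (popLoopV xi (s.map g)).1 ∧
    (popLoopA g xi s).2.map g = (popLoopV xi (s.map g)).2 := by
  induction s with
  | nil => simp [popLoopA, popLoopV]
  | cons t rest ih =>
    by_cases h : g t < xi
    · simpa [popLoopA, popLoopV, h] using ih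
    · simp [popLoopA, popLoopV, h]

theorem foldlA_map (g : Nat → Int) (idxs : List Nat) (acc : List Int) (s : List Nat) :
    (idxs.foldl (stepA g) (acc, s)).1 = ((idxs.map g).foldl stepV (acc, s.map g)).1 ∧
    (idxs.foldl (stepA g) (acc, s)).2.map g = ((idxs.map g).foldl stepV (acc, s.map g)).2 := by
  induction idxs generalizing acc s with
  | nil => simp
  | cons i idxs ih =>
    have h1 := (popLoopA_map g (g i) s).1
    have h2 := (popLoopA_map g (g i) s).2
    have hemp : (popLoopA g (g i) s).2.isEmpty = (popLoopV (g i) (s.map g)).2.isEmpty := by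
      rw [← h2]; cases (popLoopA g (g i) s).2 <;> simp
    simp only [List.foldl_cons, List.map_cons]
    have : stepV (acc, s.map g) (g i)
        = (acc ++ [(popLoopA g (g i) s).1 + (if (popLoopA g (g i) s).2.isEmpty then 0 else 1)],
           (i :: (popLoopA g (g i) s).2).map g) := by
      simp [stepV, h1, h2, hemp]
    rw [stepA, this]
    exact ih _ _

theorem popLoopV_spec (xi : Int) (t : List Int) :
    popLoopV xi t = (((t.takeWhile (fun v => decide (v < xi))).length : Int),
                     t.dropWhile (fun v => decide (v < xi))) := by
  induction t with
  | nil => simp [popLoopV]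
  | cons b t ih =>
    by_cases h : b < xi
    · simp [popLoopV, h, ih]
    · simp [popLoopV, h]

theorem cnt_eq_take_drop (xi : Int) (t : List Int) :
    cnt xi t = ((t.takeWhile (fun v => decide (v < xi))).length : Int)
      + (if (t.dropWhile (fun v => decide (v < xi))).isEmpty then 0 else 1) := by
  induction t with
  | nil => simp [cnt]
  | cons b t ih =>
    by_cases h : xi ≤ b
    · have : ¬ (b < xi) := by omega
      simp [cnt, h, this]
    · have hb : b < xi := by omega
      simp [cnt, h, hb, ih]; ring

-- the outputs of the value-level pass: cnt at each step against the current stack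
def outs (w : List Int) : List Int → List Int
  | [] => []
  | v :: vs => cnt v (Tstk w) :: outs (v :: w) vs

theorem stepV_eq (acc : List Int) (w : List Int) (v : Int) :
    stepV (acc, Tstk w) v = (acc ++ [cnt v (Tstk w)], Tstk (v :: w)) := by
  simp [stepV, popLoopV_spec, cnt_eq_take_drop, Tstk]

theorem foldlV_outs (vs : List Int) (acc w : List Int) :
    vs.foldl stepV (acc, Tstk w) = (acc ++ outs w vs, Tstk (vs.reverse ++ w)) := by
  induction vs generalizing acc w with
  | nil => simp [outs]
  | cons v vs ih =>
    simp only [List.foldl_cons, stepV_eq]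
    rw [ih (acc ++ [cnt v (Tstk w)]) (v :: w)]
    simp [outs]

theorem outs_length (w vs : List Int) : (outs w vs).length = vs.length := by
  induction vs generalizing w with
  | nil => simp [outs]
  | cons v vs ih => simp [outs, ih]

theorem outs_getD (vs : List Int) (w : List Int) (j : Nat) (hj : j < vs.length) :
    (outs w vs).getD j 0 = cnt (vs.getD j 0) (Tstk ((vs.take j).reverse ++ w)) := by
  induction vs generalizing w j with
  | nil => simp at hj
  | cons v vs ih =>
    cases j with
    | zero => simp [outs]
    | succ j =>
      simp only [outs, List.getD_cons_succ, List.take_succ_cons, List.reverse_cons,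
        List.append_assoc, List.singleton_append]
      exact ih (v :: w) j (by simpa using hj)

theorem map_getD_range (l : List Int) :
    (List.range l.length).map (fun j => l.getD j 0) = l := by
  apply List.ext_getElem
  · simp
  · intro i h1 h2
    simp only [List.getElem_map, List.getElem_range]
    rw [List.getD_eq_getElem]

theorem getD_eq_getElem' (l : List Int) (i : Nat) (h : i < l.length) :
    l.getD i 0 = l[i] := List.getD_eq_getElem l 0 h

-- left pass: left = outs [] arr
theorem left_eq (arr : List Int) :
    ((List.range arr.length).foldl (stepA (fun j => arr.getD j 0)) ([], [])).1
      = outs [] arr := by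
  have h := (foldlA_map (fun j => arr.getD j 0) (List.range arr.length) [] []).1
  rw [h, map_getD_range]
  simp only [List.map_nil]
  have := foldlV_outs arr [] []
  simp only [Tstk] at this
  rw [this]
  simp

-- right pass (processing order n-1 … 0): outputs = outs [] arr.reverse
theorem rightRev_eq (arr : List Int) :
    (((List.range arr.length).reverse.foldl (stepA (fun j => arr.getD j 0)) ([], [])).1)
      = outs [] arr.reverse := by
  have h := (foldlA_map (fun j => arr.getD j 0) (List.range arr.length).reverse [] []).1
  rw [h, List.map_reverse, map_getD_range]
  simp only [List.map_nil]
  have := foldlV_outs arr.reverse [] []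
  simp only [Tstk] at this
  rw [this]
  simp

theorem take_reverse_reverse (l : List Int) (k : Nat) (hk : k ≤ l.length) :
    (l.reverse.take k).reverse = l.drop (l.length - k) := by
  apply List.ext_getElem
  · simp; omega
  · intro i h1 h2
    simp only [List.getElem_reverse, List.getElem_take, List.getElem_drop]
    simp only [List.length_take, List.length_reverse] at h1 ⊢
    congr 1
    omega

-- ===== VERDICT (by name: the statement is the Claim_ definition above) =====
theorem maxPeople_spec : Claim_equal_maxPeople := by
  intro arr _
  unfold Spec_maxPeople maxPeople maxPeople_alt
  simp only [left_eq, rightRev_eq]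
  apply PySem.List.foldl_congr_mem
  intro acc i hi
  have hin : i < arr.length := by simpa using hi
  have hL : (outs [] arr).getD i 0 = scanB (arr.getD i 0) (arr.take i).reverse none := by
    rw [outs_getD arr [] i hin, scanB_none]
    simp
  have hlen : (outs [] arr.reverse).length = arr.length := by simp [outs_length]
  have hidx : arr.length - 1 - i < arr.length := by omega
  have hR : (outs [] arr.reverse).reverse.getD i 0
      = scanB (arr.getD i 0) (arr.drop (i + 1)) none := by
    have h1 : (outs [] arr.reverse).reverse.getD i 0
        = (outs [] arr.reverse).getD (arr.length - 1 - i) 0 := by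
      rw [getD_eq_getElem' _ i (by simp [hlen]; omega),
          getD_eq_getElem' _ _ (by rw [hlen]; exact hidx)]
      rw [List.getElem_reverse]
      congr 1
      omega
    rw [h1, outs_getD _ [] _ (by simpa [hlen] using hidx), scanB_none]
    have h2 : arr.reverse.getD (arr.length - 1 - i) 0 = arr.getD i 0 := by
      rw [getD_eq_getElem' _ _ (by simpa using hidx), getD_eq_getElem' _ _ hin,
          List.getElem_reverse]
      congr 1
      omega
    have h3 : ((arr.reverse.take (arr.length - 1 - i)).reverse : List Int)
        = arr.drop (i + 1) := by
      rw [take_reverse_reverse _ _ (by omega)]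
      congr 1
      omega
    rw [h2]
    congr 1
    rw [← h3]
    simp
  rw [hL, hR]
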